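-- pv_equiv track=rewrite | github.com/DanielKorotaev/OSMS | RGR_OSMS.py | gold_generator
-- ===== SOURCE A (Python) =====
-- def gold_generator(G):
--     x = [0, 1, 1, 0, 1]
--     y = [1, 0, 0, 1, 0]
--     arr = []
--     for i in range(G):
--         arr.append(x[4] ^ y[4])
--         xx = x[3] ^ x[4]
--         del x[-1]
--         x.insert(0, xx)
--
--         yy = y[1] ^ y[4]
--         del y[-1]  # удаляем последний элемент
--         y.insert(0, yy)  # уставляем в начало из сумматора
--
--     return list(arr)
-- ===== SOURCE B (Python) =====
-- def gold_generator(G):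
--     # The Gold sequence is the XOR of two linear (GF(2)) register outputs, so it is
--     # itself linear and satisfies a single linear recurrence; its minimal polynomial
--     # has order 7: z[n] = z[n-1]^z[n-3]^z[n-4]^z[n-5]^z[n-6]^z[n-7], seed = seven 1s.
--     # No shift registers are kept: the recurrence reads back into the output list.
--     z = []
--     for n in range(G):
--         z.append(1 if n < 7 else z[n-1] ^ z[n-3] ^ z[n-4] ^ z[n-5] ^ z[n-6] ^ z[n-7])
--     return z
-- ===== Notes on version B (the rewrite author's own statement) =====
-- stated objective: alternative
-- what changed: B eliminates both shift registers: since XORing two linear LFSR outputs is linear over GF(2), the sequence satisfies a single order-7 linear recurrence on the output itself (z[n]=z[n-1]^z[n-3]^z[n-4]^z[n-5]^z[n-6]^z[n-7], seed seven 1s), which B evaluates by reading back into the output list.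
import Mathlib
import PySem

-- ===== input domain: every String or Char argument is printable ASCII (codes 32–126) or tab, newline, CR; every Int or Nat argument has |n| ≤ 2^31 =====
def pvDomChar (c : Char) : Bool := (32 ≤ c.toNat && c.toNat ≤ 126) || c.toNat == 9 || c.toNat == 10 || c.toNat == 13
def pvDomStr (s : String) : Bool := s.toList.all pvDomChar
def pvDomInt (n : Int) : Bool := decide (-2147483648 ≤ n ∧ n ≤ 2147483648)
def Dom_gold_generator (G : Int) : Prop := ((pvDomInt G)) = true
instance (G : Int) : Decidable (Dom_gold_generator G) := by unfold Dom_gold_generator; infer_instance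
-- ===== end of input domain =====

-- B replaces A's two mutating 5-bit shift registers by the sequence's own order-7
-- linear recurrence read back from the output list (alternative algorithm, same cost).

-- ===== PORT A =====
-- A's loop over range(G); indices 1/3/4 are always in range (both lists keep
-- length 5 throughout), so x[i] is ported as List.getD i 0 (default never hit).
def goldLoopA : Nat → List Int → List Int → List Int → List Int
  | 0, _, _, arr => arr
  | n+1, x, y, arr =>
    let arr := arr ++ [PySem.Int.bxor (x.getD 4 0) (y.getD 4 0)]
    let xx := PySem.Int.bxor (x.getD 3 0) (x.getD 4 0)
    let x := xx :: x.dropLast          -- del x[-1]; x.insert(0, xx)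
    let yy := PySem.Int.bxor (y.getD 1 0) (y.getD 4 0)
    let y := yy :: y.dropLast          -- del y[-1]; y.insert(0, yy)
    goldLoopA n x y arr

def gold_generator (G : Int) : List Int :=
  goldLoopA G.toNat [0, 1, 1, 0, 1] [1, 0, 0, 1, 0] []

-- ===== PORT B =====
-- Source B's loop: z.append(1 if n < 7 else z[n-1]^z[n-3]^z[n-4]^z[n-5]^z[n-6]^z[n-7]);
-- the back-references n-1 … n-7 are in range whenever n ≥ 7, so z[j] is z.getD j 0.
def goldLoopB : Nat → Nat → List Int → List Int
  | 0, _, z => z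
  | fuel+1, n, z =>
    let bit : Int :=
      if n < 7 then 1
      else
        PySem.Int.bxor (PySem.Int.bxor (PySem.Int.bxor (PySem.Int.bxor (PySem.Int.bxor
          (z.getD (n-1) 0) (z.getD (n-3) 0)) (z.getD (n-4) 0)) (z.getD (n-5) 0))
          (z.getD (n-6) 0)) (z.getD (n-7) 0)
    goldLoopB fuel (n+1) (z ++ [bit])

def gold_generator_alt (G : Int) : List Int := goldLoopB G.toNat 0 []

-- ===== PRECONDITION & SPEC =====
def Spec_gold_generator (G : Int) (out : List Int) : Prop := out = gold_generator_alt G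
instance (G : Int) (out : List Int) : Decidable (Spec_gold_generator G out) := by unfold Spec_gold_generator; infer_instance

-- ===== CLAIM (what is proved, stated in full; the proofs are below) =====
def Claim_equal_gold_generator : Prop := ∀ (G : Int), Dom_gold_generator G → Spec_gold_generator G (gold_generator G)

-- ===== LEMMAS AND PROOFS =====

-- one full period (93) of the Gold sequence; both ports are proved equal to its tiling
def table : List Int :=
  [1, 1, 1, 1, 1, 1, 1, 0, 1, 0, 0, 0, 1, 1, 0, 0, 0, 0, 0, 0, 1, 1, 1, 0, 0, 1, 0,
   1, 0, 0, 0, 0, 0, 1, 0, 0, 1, 0, 1, 1, 1, 1, 0, 0, 0, 0, 1, 1, 0, 1, 1, 1, 0, 0,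
   0, 1, 0, 0, 0, 1, 0, 1, 1, 0, 0, 1, 0, 0, 1, 1, 0, 0, 1, 1, 1, 0, 1, 0, 1, 1, 0,
   1, 0, 1, 0, 1, 0, 0, 1, 1, 1, 1, 0]

def tbl (i : Nat) : Int := table.getD (i % 93) 0

def tile (n : Nat) : List Int := (List.range n).map tbl

-- A's loop body as a function on the register pair
def Astep (s : List Int × List Int) : List Int × List Int :=
  (PySem.Int.bxor (s.1.getD 3 0) (s.1.getD 4 0) :: s.1.dropLast,
   PySem.Int.bxor (s.2.getD 1 0) (s.2.getD 4 0) :: s.2.dropLast)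

def stA (k : Nat) : List Int × List Int := Astep^[k] ([0, 1, 1, 0, 1], [1, 0, 0, 1, 0])

lemma orbit : ∀ k < 93,
    PySem.Int.bxor ((stA k).1.getD 4 0) ((stA k).2.getD 4 0) = table.getD k 0 ∧
    Astep (stA k) = stA ((k + 1) % 93) := by decide

lemma loopA_eq : ∀ (fuel k : Nat), k < 93 → ∀ arr : List Int,
    goldLoopA fuel (stA k).1 (stA k).2 arr
      = arr ++ (List.range fuel).map (fun i => tbl (k + i)) := by
  intro fuel
  induction fuel with
  | zero => intro k _ arr; simp [goldLoopA]
  | succ n ih =>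
    intro k hk arr
    obtain ⟨hbit, hstep⟩ := orbit k hk
    simp only [goldLoopA]
    have h1 : (PySem.Int.bxor ((stA k).1.getD 3 0) ((stA k).1.getD 4 0) :: (stA k).1.dropLast)
        = (stA ((k + 1) % 93)).1 := congrArg Prod.fst hstep
    have h2 : (PySem.Int.bxor ((stA k).2.getD 1 0) ((stA k).2.getD 4 0) :: (stA k).2.dropLast)
        = (stA ((k + 1) % 93)).2 := congrArg Prod.snd hstep
    rw [h1, h2, ih ((k + 1) % 93) (Nat.mod_lt _ (by norm_num)) _]
    rw [List.range_succ_eq_map]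
    simp only [List.map_cons, List.map_map, List.append_assoc, List.singleton_append]
    congr 1
    congr 1
    · simpa [tbl, Nat.mod_eq_of_lt hk] using hbit
    · refine List.map_congr_left (fun i _ => ?_)
      simp only [Function.comp, tbl]
      congr 1
      omega

-- the first seven table entries are 1
lemma seed7 : ∀ n < 7, tbl n = 1 := by decide

-- the order-7 recurrence holds on the table, checked over one full period
lemma rec93 : ∀ r < 93,
    tbl (r + 7) = PySem.Int.bxor (PySem.Int.bxor (PySem.Int.bxor (PySem.Int.bxor
      (PySem.Int.bxor (tbl (r + 6)) (tbl (r + 4))) (tbl (r + 3))) (tbl (r + 2)))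
      (tbl (r + 1))) (tbl r) := by decide

lemma tbl_mod (c m : Nat) : tbl (m % 93 + c) = tbl (m + c) := by
  simp only [tbl]
  congr 1
  omega

lemma rec_all (n : Nat) (h : 7 ≤ n) :
    tbl n = PySem.Int.bxor (PySem.Int.bxor (PySem.Int.bxor (PySem.Int.bxor
      (PySem.Int.bxor (tbl (n - 1)) (tbl (n - 3))) (tbl (n - 4))) (tbl (n - 5)))
      (tbl (n - 6))) (tbl (n - 7)) := by
  obtain ⟨m, rfl⟩ : ∃ m, n = m + 7 := ⟨n - 7, by omega⟩
  have := rec93 (m % 93) (Nat.mod_lt _ (by norm_num))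
  rw [tbl_mod 7 m, tbl_mod 6 m, tbl_mod 4 m, tbl_mod 3 m, tbl_mod 2 m, tbl_mod 1 m] at this
  have h0 : tbl (m % 93) = tbl m := by simpa using tbl_mod 0 m
  rw [h0] at this
  simpa using this

lemma tile_getD {i n : Nat} (h : i < n) : (tile n).getD i 0 = tbl i := by
  simp [tile, List.getD, h]

lemma tile_succ (n : Nat) : tile n ++ [tbl n] = tile (n + 1) := by
  simp [tile, List.range_succ]

lemma loopB_eq : ∀ (fuel n : Nat), goldLoopB fuel n (tile n) = tile (n + fuel) := by
  intro fuel
  induction fuel with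
  | zero => intro n; simp [goldLoopB]
  | succ m ih =>
    intro n
    simp only [goldLoopB]
    have hbit : (if n < 7 then (1 : Int)
        else PySem.Int.bxor (PySem.Int.bxor (PySem.Int.bxor (PySem.Int.bxor (PySem.Int.bxor
          ((tile n).getD (n-1) 0) ((tile n).getD (n-3) 0)) ((tile n).getD (n-4) 0))
          ((tile n).getD (n-5) 0)) ((tile n).getD (n-6) 0)) ((tile n).getD (n-7) 0))
        = tbl n := by
      by_cases h : n < 7
      · simp [h, seed7 n h]
      · rw [Nat.not_lt] at h
        rw [if_neg (by omega)]
        rw [tile_getD (by omega), tile_getD (by omega), tile_getD (by omega),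
            tile_getD (by omega), tile_getD (by omega), tile_getD (by omega)]
        exact (rec_all n h).symm
    rw [hbit, tile_succ, ih (n + 1)]
    congr 1
    omega

-- ===== VERDICT (by name: the statement is the Claim_ definition above) =====
theorem gold_generator_spec : Claim_equal_gold_generator := by
  intro G _
  show gold_generator G = gold_generator_alt G
  have hA : gold_generator G = tile G.toNat := by
    have h0 : stA 0 = ([0, 1, 1, 0, 1], [1, 0, 0, 1, 0]) := rfl
    have := loopA_eq G.toNat 0 (by norm_num) []
    rw [h0] at this
    simpa [tile] using this
  have hB : gold_generator_alt G = tile G.toNat := by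
    have := loopB_eq G.toNat 0
    simpa [gold_generator_alt, tile] using this
  rw [hA, hB]
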